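-- pv_equiv track=rewrite | github.com/MarcosBianchii/Teoria-de-Algoritmos | TP3/codigo/validador.py | conseguir_barcos
-- ===== SOURCE A (Python) =====
-- def conseguir_barcos(tablero):
--     """
--     La complejidad del algoritmo es O(n * m)
--     """
--     # O(n * m)
--     tablero = tablero.copy()
--     n, m = len(tablero), len(tablero[0])
--
--     def en_rango(casillero):
--         i, j = casillero
--         return 0 <= i and 0 <= j and i < n and j < m
--
--     def siguientes(i, j):
--         yield i, j + 1
--         yield i + 1, j
--
--     def tomar_barco(i, j):
--         if tablero[i][j] == 0:
--             return 0
--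
--         largo = 0
--         tablero[i][j] = 0
--         for i, j in filter(en_rango, siguientes(i, j)):
--             largo += tomar_barco(i, j)
--
--         return largo + 1
--
--     # O(n * m)
--     barcos = []
--     for i in range(n):
--         for j in range(m):
--             if tablero[i][j] == 1:
--                 largo = tomar_barco(i, j)
--                 barcos.append(largo)
--
--     return barcos
-- ===== SOURCE B (Python) =====
-- def conseguir_barcos(tablero):
--     # Iterative version: explicit stack instead of recursion; ships are
--     # collected by flood-filling right/down from each seed in reading order.
--     # Like A (which shallow-copies the outer list), this zeroes cells in the
--     # caller's row objects.
--     n, m = len(tablero), len(tablero[0])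
--     barcos = []
--     for i in range(n):
--         for j in range(m):
--             if tablero[i][j] == 1:
--                 largo = 0
--                 stack = [(i, j)]
--                 while stack:
--                     a, b = stack.pop()
--                     if tablero[a][b] != 0:
--                         tablero[a][b] = 0
--                         largo += 1
--                         if a + 1 < n:
--                             stack.append((a + 1, b))
--                         if b + 1 < m:
--                             stack.append((a, b + 1))
--                 barcos.append(largo)
--     return barcos
-- ===== Notes on version B (the rewrite author's own statement) =====
-- stated objective: faster
-- what changed: Replaces A's nested recursive flood fill (tomar_barco) by an iterative explicit-stack fill inside the same reading-order seeding loop; the per-seed ship length is accumulated by the while-loop instead of summed up the recursion.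
import Mathlib
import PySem

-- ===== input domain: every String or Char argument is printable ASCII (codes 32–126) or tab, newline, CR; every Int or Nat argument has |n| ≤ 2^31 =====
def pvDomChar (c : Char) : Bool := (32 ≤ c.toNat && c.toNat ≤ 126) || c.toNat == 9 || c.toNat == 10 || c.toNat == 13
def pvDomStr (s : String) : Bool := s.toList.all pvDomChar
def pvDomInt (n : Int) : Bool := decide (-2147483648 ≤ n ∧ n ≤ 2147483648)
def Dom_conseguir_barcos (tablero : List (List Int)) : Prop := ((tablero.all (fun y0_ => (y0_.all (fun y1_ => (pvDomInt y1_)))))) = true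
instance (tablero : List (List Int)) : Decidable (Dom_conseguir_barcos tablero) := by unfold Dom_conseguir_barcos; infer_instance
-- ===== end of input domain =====

-- B replaces A's recursive flood fill by an explicit-stack iteration (same
-- right/down neighbor rule, same reading-order seeding): an alternative
-- decomposition of similar cost.  Both Pythons zero cells in the caller's row
-- objects (A through a shallow copy), so the observable side effects coincide;
-- the theorems below are about the returned list.

-- shared cell read/write helpers (Python's tablero[i][j]; all indices this
-- code produces are non-negative, so Nat indices are exact; an out-of-range
-- read defaults to 0 here where Python raises — such inputs are outside Pre_)
def pvCell (g : List (List Int)) (i j : Nat) : Int := (g.getD i []).getD j 0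

def pvSet (g : List (List Int)) (i j : Nat) (v : Int) : List (List Int) :=
  g.set i ((g.getD i []).set j v)

-- ===== PORT A =====
-- A's nested tomar_barco, with the mutated grid threaded explicitly; the loop
-- over filter(en_rango, siguientes(i, j)) is the two guarded calls below, in
-- generator order (right then down; en_rango's 0 ≤ i, 0 ≤ j hold for Nat)
def tomarBarco (n m : Nat) (g : List (List Int)) (i j : Nat) : List (List Int) × Int :=
  if pvCell g i j = 0 then (g, 0)
  else
    let g1 := pvSet g i j 0
    let p1 := if i < n ∧ j + 1 < m then tomarBarco n m g1 i (j+1) else (g1, 0)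
    let p2 := if i + 1 < n ∧ j < m then tomarBarco n m p1.1 (i+1) j else (p1.1, 0)
    (p2.1, p1.2 + p2.2 + 1)
termination_by (n - i) + (m - j)
decreasing_by all_goals omega

def conseguir_barcos (tablero : List (List Int)) : List Int :=
  let n := tablero.length
  let m := (tablero.getD 0 []).length
  ((List.range n).foldl (fun st i =>
    (List.range m).foldl (fun (st : List (List Int) × List Int) j =>
      if pvCell st.1 i j = 1 then
        let p := tomarBarco n m st.1 i j
        (p.1, st.2 ++ [p.2])
      else st) st) (tablero, ([] : List Int))).2

-- ===== PORT B =====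
-- termination measure for B's while-loop, cited by fillStack's decreasing_by:
-- zeroing a nonzero cell strictly shrinks the number of nonzero cells
def nz (g : List (List Int)) : Nat := (g.map (fun r => r.countP (fun x => x != 0))).sum

theorem countP_set_lt : ∀ (r : List Int) (b : Nat), r.getD b 0 ≠ 0 →
    (r.set b 0).countP (fun x => x != 0) < r.countP (fun x => x != 0) := by
  intro r
  induction r with
  | nil => intro b h; simp at h
  | cons x t ih =>
    intro b h
    cases b with
    | zero => simp at h; simp [h]
    | succ b => simp at h; have := ih b h; simp [List.countP_cons]; omega

theorem nz_set_lt : ∀ (g : List (List Int)) (a b : Nat), pvCell g a b ≠ 0 →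
    nz (pvSet g a b 0) < nz g := by
  intro g
  induction g with
  | nil => intro a b h; simp [pvCell] at h
  | cons r t ih =>
    intro a b h
    cases a with
    | zero =>
      simp [pvCell] at h
      simp [pvSet, nz]
      exact countP_set_lt r b h
    | succ a =>
      simp [pvCell] at h
      have := ih a b h
      simp [pvSet, nz] at this ⊢
      omega

-- B's while-loop: the stack's head is its top; Python pushes (a+1,b) first
-- and then (a,b+1), so (a,b+1) is popped first
def fillStack (n m : Nat) (g : List (List Int)) (st : List (Nat × Nat)) (largo : Int) :
    List (List Int) × Int :=
  match st with
  | [] => (g, largo)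
  | (a, b) :: rest =>
    if h : pvCell g a b ≠ 0 then
      let rest1 := if a + 1 < n then (a+1, b) :: rest else rest
      let rest2 := if b + 1 < m then (a, b+1) :: rest1 else rest1
      fillStack n m (pvSet g a b 0) rest2 (largo + 1)
    else fillStack n m g rest largo
termination_by (nz g, st.length)
decreasing_by
  · exact Prod.Lex.left _ _ (nz_set_lt g a b h)
  · exact Prod.Lex.right _ (by simp)

def conseguir_barcos_alt (tablero : List (List Int)) : List Int :=
  let n := tablero.length
  let m := (tablero.getD 0 []).length
  ((List.range n).foldl (fun st i =>
    (List.range m).foldl (fun (st : List (List Int) × List Int) j =>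
      if pvCell st.1 i j = 1 then
        let p := fillStack n m st.1 [(i, j)] 0
        (p.1, st.2 ++ [p.2])
      else st) st) (tablero, ([] : List Int))).2

-- ===== PRECONDITION & SPEC =====
-- Pre_ excludes exactly the inputs on which the Python A raises IndexError:
-- the empty board (tablero[0]) and ragged boards where some row is shorter
-- than row 0 (the loops read tablero[i][j] for every j < len(tablero[0])).
def Pre_conseguir_barcos (tablero : List (List Int)) : Prop :=
  tablero ≠ [] ∧ ∀ r ∈ tablero, (tablero.getD 0 []).length ≤ r.length

instance (tablero : List (List Int)) : Decidable (Pre_conseguir_barcos tablero) := by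
  unfold Pre_conseguir_barcos; infer_instance

def pvWitness_conseguir_barcos : List (List Int) := [[1, 0, 1], [1, 1, 0]]

def Spec_conseguir_barcos (tablero : List (List Int)) (out : List Int) : Prop := out = conseguir_barcos_alt tablero
instance (tablero : List (List Int)) (out : List Int) : Decidable (Spec_conseguir_barcos tablero out) := by unfold Spec_conseguir_barcos; infer_instance

-- ===== CLAIM (what is proved, stated in full; the proofs are below) =====
def Claim_equal_conseguir_barcos : Prop := ∀ (tablero : List (List Int)), Dom_conseguir_barcos tablero → Pre_conseguir_barcos tablero → Spec_conseguir_barcos tablero (conseguir_barcos tablero)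

-- ===== LEMMAS AND PROOFS =====

theorem pvSet_length (g : List (List Int)) (a b : Nat) (v : Int) :
    (pvSet g a b v).length = g.length := by simp [pvSet]

theorem tomar_length (n m : Nat) (g : List (List Int)) (i j : Nat) :
    (tomarBarco n m g i j).1.length = g.length := by
  fun_induction tomarBarco n m g i j with
  | case1 => rfl
  | case2 g i j hc g1 p1 p2 ih1 ih1' ih2 =>
    simp only [p2, p1, g1] at *
    split_ifs with h1 h2 h2 <;> simp_all [pvSet_length]

theorem countP_set_le (r : List Int) (b : Nat) :
    (r.set b 0).countP (fun x => x != 0) ≤ r.countP (fun x => x != 0) := by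
  induction r generalizing b with
  | nil => simp
  | cons x t ih =>
    cases b with
    | zero => simp only [List.set_cons_zero, List.countP_cons]; split_ifs <;> simp_all
    | succ b => have := ih b; simp [List.countP_cons]; omega

theorem nz_set_le (g : List (List Int)) (a b : Nat) :
    nz (pvSet g a b 0) ≤ nz g := by
  induction g generalizing a with
  | nil => simp [pvSet, nz]
  | cons r t ih =>
    cases a with
    | zero => simp [pvSet, nz]; have := countP_set_le r b; omega
    | succ a => have := ih a; simp [pvSet, nz] at this ⊢; omega

theorem tomar_nz_le (n m : Nat) (g : List (List Int)) (i j : Nat) :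
    nz (tomarBarco n m g i j).1 ≤ nz g := by
  fun_induction tomarBarco n m g i j with
  | case1 => exact le_refl _
  | case2 g i j hc g1 p1 p2 ih1 ih1' ih2 =>
    simp only [p2, p1, g1] at *
    have hs := nz_set_le g i j
    split_ifs with h1 h2 h2 <;> simp_all <;> omega

-- key simulation lemma: popping (i,j) and running B's stack loop equals
-- running A's recursion at (i,j), then continuing on the remaining stack
theorem fill_popN (n m : Nat) : ∀ (N : Nat) (g : List (List Int)), nz g < N →
    ∀ (i j : Nat) (rest : List (Nat × Nat)) (largo : Int),
    g.length = n → i < n → j < m →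
    fillStack n m g ((i, j) :: rest) largo =
      fillStack n m (tomarBarco n m g i j).1 rest (largo + (tomarBarco n m g i j).2) := by
  intro N
  induction N with
  | zero => intro g h; omega
  | succ N ih =>
    intro g hN i j rest largo hlen hi hj
    by_cases hc : pvCell g i j = 0
    · rw [fillStack, tomarBarco]
      simp [hc]
    · rw [fillStack, tomarBarco]
      simp only [hc, if_neg, dif_pos, ne_eq, not_false_iff]
      have h1 : nz (pvSet g i j 0) < N := by have := nz_set_lt g i j hc; omega
      have hl1 : (pvSet g i j 0).length = n := by rw [pvSet_length]; exact hlen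
      by_cases hr : j + 1 < m <;> by_cases hd : i + 1 < n <;>
        simp only [hr, hd, hi, hj, if_false, and_true, and_self, if_pos, and_false]
      · -- both neighbors pushed
        rw [ih _ h1 i (j+1) _ _ hl1 hi hr]
        have h2 : nz (tomarBarco n m (pvSet g i j 0) i (j+1)).1 < N :=
          lt_of_le_of_lt (tomar_nz_le _ _ _ _ _) h1
        have hl2 : (tomarBarco n m (pvSet g i j 0) i (j+1)).1.length = n := by
          rw [tomar_length]; exact hl1
        rw [ih _ h2 (i+1) j _ _ hl2 hd hj]
        congr 1
        ring
      · -- only the right neighbor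
        rw [ih _ h1 i (j+1) _ _ hl1 hi hr]
        congr 1
        ring
      · -- only the down neighbor
        rw [ih _ h1 (i+1) j _ _ hl1 hd hj]
        congr 1
        ring
      · -- no neighbor
        congr 1

theorem fill_pop (n m : Nat) (g : List (List Int)) (i j : Nat)
    (rest : List (Nat × Nat)) (largo : Int)
    (hlen : g.length = n) (hi : i < n) (hj : j < m) :
    fillStack n m g ((i, j) :: rest) largo =
      fillStack n m (tomarBarco n m g i j).1 rest (largo + (tomarBarco n m g i j).2) :=
  fill_popN n m (nz g + 1) g (by omega) i j rest largo hlen hi hj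

theorem fill_seed (n m : Nat) (g : List (List Int)) (i j : Nat)
    (hlen : g.length = n) (hi : i < n) (hj : j < m) :
    fillStack n m g [(i, j)] 0 = tomarBarco n m g i j := by
  rw [fill_pop n m g i j [] 0 hlen hi hj, fillStack]
  simp

theorem inner_len (n m i : Nat) : ∀ (js : List Nat) (st : List (List Int) × List Int),
    ((js.foldl (fun (st : List (List Int) × List Int) j =>
      if pvCell st.1 i j = 1 then
        let p := tomarBarco n m st.1 i j
        (p.1, st.2 ++ [p.2])
      else st) st).1.length = st.1.length) := by
  intro js
  induction js with
  | nil => intro st; rfl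
  | cons j js ih =>
    intro st
    rw [List.foldl_cons, ih]
    by_cases hc : pvCell st.1 i j = 1 <;> simp [hc, tomar_length]

theorem inner_eq (n m i : Nat) (hi : i < n) : ∀ (js : List Nat), (∀ j ∈ js, j < m) →
    ∀ (st : List (List Int) × List Int), st.1.length = n →
    js.foldl (fun (st : List (List Int) × List Int) j =>
      if pvCell st.1 i j = 1 then
        let p := tomarBarco n m st.1 i j
        (p.1, st.2 ++ [p.2])
      else st) st =
    js.foldl (fun (st : List (List Int) × List Int) j =>
      if pvCell st.1 i j = 1 then
        let p := fillStack n m st.1 [(i, j)] 0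
        (p.1, st.2 ++ [p.2])
      else st) st := by
  intro js
  induction js with
  | nil => intro _ st _; rfl
  | cons j js ih =>
    intro hjs st hlen
    rw [List.foldl_cons, List.foldl_cons]
    have hj : j < m := hjs j (by simp)
    by_cases hc : pvCell st.1 i j = 1
    · simp only [hc, if_pos]
      rw [fill_seed n m st.1 i j hlen hi hj]
      exact ih (fun x hx => hjs x (by simp [hx])) _ (by simp [tomar_length, hlen])
    · simp only [hc, ite_false]
      exact ih (fun x hx => hjs x (by simp [hx])) _ hlen

theorem outer_eq (n m : Nat) : ∀ (is : List Nat), (∀ i ∈ is, i < n) →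
    ∀ (st : List (List Int) × List Int), st.1.length = n →
    is.foldl (fun st i => (List.range m).foldl (fun (st : List (List Int) × List Int) j =>
      if pvCell st.1 i j = 1 then
        let p := tomarBarco n m st.1 i j
        (p.1, st.2 ++ [p.2])
      else st) st) st =
    is.foldl (fun st i => (List.range m).foldl (fun (st : List (List Int) × List Int) j =>
      if pvCell st.1 i j = 1 then
        let p := fillStack n m st.1 [(i, j)] 0
        (p.1, st.2 ++ [p.2])
      else st) st) st := by
  intro is
  induction is with
  | nil => intro _ st _; rfl
  | cons i is ih =>
    intro his st hlen
    rw [List.foldl_cons, List.foldl_cons]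
    have hi : i < n := his i (by simp)
    rw [← inner_eq n m i hi (List.range m) (fun j hj => List.mem_range.mp hj) st hlen]
    exact ih (fun x hx => his x (by simp [hx])) _ (by rw [inner_len]; exact hlen)

-- ===== VERDICT (by name: the statement is the Claim_ definition above) =====
theorem conseguir_barcos_spec : Claim_equal_conseguir_barcos := by
  intro tablero _ _
  unfold Spec_conseguir_barcos conseguir_barcos conseguir_barcos_alt
  have := outer_eq tablero.length (tablero.getD 0 []).length (List.range tablero.length)
    (fun i hi => List.mem_range.mp hi) (tablero, ([] : List Int)) rfl
  simp only [this]
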